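-- pv_equiv track=rewrite | github.com/benab04/Facility-Layout-Design | corelap.py | get_placement_order
-- ===== SOURCE A (Python) =====
-- departments = [0, 1, 2, 3, 4]
--
-- dept_sizes = {0: 3, 1: 2, 2: 1, 3: 2, 4: 1}
--
-- rel_chart = [
--     ['-', 'A', 'E', 'I', 'O'],
--     ['A', '-', 'U', 'X', 'I'],
--     ['E', 'U', '-', 'A', 'E'],
--     ['I', 'X', 'A', '-', 'U'],
--     ['O', 'I', 'E', 'U', '-']
-- ]
--
-- def get_placement_order(tcrs):
--     """Determines the placement sequence with tie-breakers (Area/Size)."""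
--     unplaced = list(departments)
--     placed_order = []
--
--     # 1. First Dept: Max TCR, tie-breaker: Max Area (size)
--     first_dept = max(unplaced, key=lambda x: (tcrs[x], dept_sizes[x]))
--     placed_order.append(first_dept)
--     unplaced.remove(first_dept)
--
--     hierarchy = ['A', 'E', 'I', 'O', 'U', 'X']
--
--     # 2. Subsequent Depts
--     while unplaced:
--         best_candidate = None
--         best_rel_index = 999
--
--         for candidate in unplaced:
--             # Strongest relation to ANY already placed department
--             best_rel_for_candidate = 999
--             for placed_dept in placed_order:
--                 rel = rel_chart[candidate][placed_dept]
--                 rel_idx = hierarchy.index(rel) if rel in hierarchy else 999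
--                 if rel_idx < best_rel_for_candidate:
--                     best_rel_for_candidate = rel_idx
--
--             # Compare to find the winner
--             if best_rel_for_candidate < best_rel_index:
--                 best_rel_index = best_rel_for_candidate
--                 best_candidate = candidate
--             elif best_rel_for_candidate == best_rel_index:
--                 # Tie-breaker 1: TCR. Tie-breaker 2: Area
--                 if best_candidate is None:
--                     best_candidate = candidate
--                 else:
--                     cand_tup = (tcrs[candidate], dept_sizes[candidate])
--                     best_tup = (tcrs[best_candidate], dept_sizes[best_candidate])
--                     if cand_tup > best_tup:
--                         best_candidate = candidate
--
--         placed_order.append(best_candidate)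
--         unplaced.remove(best_candidate)
--
--     return placed_order
-- ===== SOURCE B (Python) =====
-- departments = [0, 1, 2, 3, 4]
--
-- dept_sizes = {0: 3, 1: 2, 2: 1, 3: 2, 4: 1}
--
-- rel_chart = [
--     ['-', 'A', 'E', 'I', 'O'],
--     ['A', '-', 'U', 'X', 'I'],
--     ['E', 'U', '-', 'A', 'E'],
--     ['I', 'X', 'A', '-', 'U'],
--     ['O', 'I', 'E', 'U', '-']
-- ]
--
-- _RANK = {'A': 0, 'E': 1, 'I': 2, 'O': 3, 'U': 4, 'X': 5}
--
--
-- def get_placement_order(tcrs):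
--     """Greedy placement order via an incrementally maintained best-relation table."""
--     unplaced = list(departments)
--     first = max(unplaced, key=lambda x: (tcrs[x], dept_sizes[x]))
--     order = [first]
--     unplaced.remove(first)
--
--     best_rel = {c: 999 for c in unplaced}
--     last = first
--     while unplaced:
--         # one pass: fold the newly placed department into the table
--         for c in unplaced:
--             r = _RANK.get(rel_chart[c][last], 999)
--             if r < best_rel[c]:
--                 best_rel[c] = r
--         nxt = max(unplaced, key=lambda c: (-best_rel[c], tcrs[c], dept_sizes[c]))
--         order.append(nxt)
--         unplaced.remove(nxt)
--         last = nxt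
--     return order
-- ===== Notes on version B (the rewrite author's own statement) =====
-- stated objective: alternative
-- what changed: Replaces A's nested rescan of placed_order inside the candidate loop by an incrementally maintained best-relation table (one min-update pass per newly placed department) plus a single keyed max(unplaced, key=(-best_rel, tcr, size)) selection.
import Mathlib
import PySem

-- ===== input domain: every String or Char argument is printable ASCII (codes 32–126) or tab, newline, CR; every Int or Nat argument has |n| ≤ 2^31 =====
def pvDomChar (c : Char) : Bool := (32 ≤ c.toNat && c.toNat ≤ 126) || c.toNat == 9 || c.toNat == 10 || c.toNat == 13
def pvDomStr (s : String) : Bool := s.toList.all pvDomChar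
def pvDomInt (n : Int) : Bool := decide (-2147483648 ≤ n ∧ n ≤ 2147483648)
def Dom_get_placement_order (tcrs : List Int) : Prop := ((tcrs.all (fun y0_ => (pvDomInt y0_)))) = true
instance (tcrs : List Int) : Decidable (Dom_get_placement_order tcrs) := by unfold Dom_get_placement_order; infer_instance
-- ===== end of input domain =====

-- B replaces A's inner rescan of placed_order by an incrementally maintained
-- best-relation table plus one keyed max selection (objective: alternative).

-- ===== PORT A =====
-- module-level constants
def pvDepartments : List Int := [0, 1, 2, 3, 4]
def pvDeptSizes : PySem.Dict Int Int := PySem.Dict.ofList [(0, 3), (1, 2), (2, 1), (3, 2), (4, 1)]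
def pvRelChart : List (List Char) :=
  [['-', 'A', 'E', 'I', 'O'],
   ['A', '-', 'U', 'X', 'I'],
   ['E', 'U', '-', 'A', 'E'],
   ['I', 'X', 'A', '-', 'U'],
   ['O', 'I', 'E', 'U', '-']]
def pvHierarchy : List Char := ['A', 'E', 'I', 'O', 'U', 'X']

-- tcrs[x]; index is in range under Pre_ (x ∈ 0..4, len ≥ 5), so getD 0 is exact there
def pvTcr (tcrs : List Int) (x : Int) : Int := (PySem.List.pyGet? tcrs x).getD 0
-- dept_sizes[x]; the key is always one of 0..4, always present, so getD 0 is exact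
def pvSize (x : Int) : Int := (pvDeptSizes.get? x).getD 0
-- rel_chart[c][d]; both indices are always in 0..4, so the defaults are never used
def pvRel (c d : Int) : Char :=
  (PySem.List.pyGet? ((PySem.List.pyGet? pvRelChart c).getD []) d).getD '-'

-- hierarchy.index(rel) if rel in hierarchy else 999
def pvRelIdxA (c d : Int) : Int :=
  match PySem.List.index? pvHierarchy (pvRel c d) with
  | some i => (i : Int)
  | none => 999

-- inner loop: for placed_dept in placed_order: keep the smallest rel index
def pvBestRelFor (placed : List Int) (c : Int) : Int :=
  placed.foldl (fun b d => if pvRelIdxA c d < b then pvRelIdxA c d else b) 999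

-- Python tuple comparison cand_tup > best_tup (lexicographic, two components)
def pvTupGt (a b : Int × Int) : Bool := a.1 > b.1 || (a.1 == b.1 && a.2 > b.2)

-- body of 'for candidate in unplaced' with state (best_candidate, best_rel_index)
def pvAStep (tcrs : List Int) (placed : List Int) (st : Option Int × Int) (c : Int) :
    Option Int × Int :=
  let b := pvBestRelFor placed c
  if b < st.2 then (some c, b)
  else if b = st.2 then
    match st.1 with
    | none => (some c, st.2)
    | some bc =>
      if pvTupGt (pvTcr tcrs c, pvSize c) (pvTcr tcrs bc, pvSize bc) then (some c, st.2) else st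
  else st

-- while unplaced: … (fuel = |unplaced|; best_candidate = None is unreachable)
def pvALoop (tcrs : List Int) : Nat → List Int → List Int → List Int
  | 0, _, placed => placed
  | fuel + 1, unplaced, placed =>
    if unplaced = [] then placed
    else
      match (unplaced.foldl (pvAStep tcrs placed) (none, 999)).1 with
      | none => placed
      | some bc =>
        pvALoop tcrs fuel ((PySem.List.remove? unplaced bc).getD unplaced) (placed ++ [bc])

def get_placement_order (tcrs : List Int) : List Int :=
  match PySem.List.max2? pvDepartments (fun x => pvTcr tcrs x) (fun x => pvSize x) with
  | none => []  -- unreachable: departments is nonempty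
  | some first =>
    let unplaced := (PySem.List.remove? pvDepartments first).getD pvDepartments
    pvALoop tcrs unplaced.length unplaced [first]

-- ===== PORT B =====
-- _RANK.get(rel, 999)
def pvRankB (ch : Char) : Int :=
  (PySem.Dict.ofList [('A', 0), ('E', 1), ('I', 2), ('O', 3), ('U', 4), ('X', 5)]).getD ch 999

-- body of 'for c in unplaced' folding the newly placed department into the table
def pvUpd (last : Int) (d : PySem.Dict Int Int) (c : Int) : PySem.Dict Int Int :=
  let r := pvRankB (pvRel c last)
  if r < d.getD c 999 then d.insert c r else d

def pvKey3 (tcrs : List Int) (d : PySem.Dict Int Int) (c : Int) : Int × Int × Int :=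
  (-(d.getD c 999), pvTcr tcrs c, pvSize c)

-- Python '>' on 3-tuples, lexicographic
def pvLexGt3 (a b : Int × Int × Int) : Bool :=
  a.1 > b.1 || (a.1 == b.1 && (a.2.1 > b.2.1 || (a.2.1 == b.2.1 && a.2.2 > b.2.2)))

-- hand port of max(u0 :: rest, key=triple): Python keeps the FIRST maximal element; exact
def pvMax3 (key : Int → Int × Int × Int) : Int → List Int → Int
  | best, [] => best
  | best, c :: rest => pvMax3 key (if pvLexGt3 (key c) (key best) then c else best) rest

def pvBLoop (tcrs : List Int) :
    Nat → PySem.Dict Int Int → Int → List Int → List Int → List Int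
  | 0, _, _, _, order => order
  | fuel + 1, br, last, unplaced, order =>
    match unplaced with
    | [] => order
    | u0 :: rest =>
      let br' := (u0 :: rest).foldl (pvUpd last) br
      let nxt := pvMax3 (pvKey3 tcrs br') u0 rest
      pvBLoop tcrs fuel br' nxt ((PySem.List.remove? (u0 :: rest) nxt).getD (u0 :: rest))
        (order ++ [nxt])

def get_placement_order_alt (tcrs : List Int) : List Int :=
  match PySem.List.max2? pvDepartments (fun x => pvTcr tcrs x) (fun x => pvSize x) with
  | none => []  -- unreachable: departments is nonempty
  | some first =>
    let unplaced := (PySem.List.remove? pvDepartments first).getD pvDepartments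
    -- {c: 999 for c in unplaced}
    let br := unplaced.foldl (fun d c => d.insert c 999) (PySem.Dict.empty : PySem.Dict Int Int)
    pvBLoop tcrs unplaced.length br first unplaced [first]

-- ===== PRECONDITION & SPEC =====
-- Python A evaluates tcrs[0..4]; on shorter lists it raises IndexError, so those are excluded.
def Pre_get_placement_order (tcrs : List Int) : Prop := 5 ≤ tcrs.length
instance (tcrs : List Int) : Decidable (Pre_get_placement_order tcrs) := by
  unfold Pre_get_placement_order; infer_instance
def pvWitness_get_placement_order : List Int := [0, 0, 0, 0, 0]

def Spec_get_placement_order (tcrs : List Int) (out : List Int) : Prop :=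
  out = get_placement_order_alt tcrs
instance (tcrs : List Int) (out : List Int) : Decidable (Spec_get_placement_order tcrs out) := by
  unfold Spec_get_placement_order; infer_instance

-- ===== CLAIM (what is proved, stated in full; the proofs are below) =====
def Claim_equal_get_placement_order : Prop :=
  ∀ (tcrs : List Int), Dom_get_placement_order tcrs → Pre_get_placement_order tcrs →
    Spec_get_placement_order tcrs (get_placement_order tcrs)

-- ===== LEMMAS AND PROOFS =====

-- the relation char is always '-' or a chart entry
theorem pvRel_mem (c d : Int) : pvRel c d ∈ '-' :: pvRelChart.flatten := by
  unfold pvRel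
  cases h : PySem.List.pyGet? pvRelChart c with
  | none => simp [PySem.List.pyGet?, PySem.List.pyIdx?]
  | some row =>
    have hr := PySem.List.mem_of_pyGet?_eq_some _ h
    simp only [Option.getD_some]
    cases h2 : PySem.List.pyGet? row d with
    | none => simp
    | some ch =>
      have hc := PySem.List.mem_of_pyGet?_eq_some _ h2
      simp only [Option.getD_some, List.mem_cons]
      right
      exact List.mem_flatten.mpr ⟨row, hr, hc⟩

-- A's hierarchy.index-based rank equals B's _RANK.get-based rank on every chart entry
theorem pvRankIdx_eq (ch : Char) (h : ch ∈ '-' :: pvRelChart.flatten) :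
    (match PySem.List.index? pvHierarchy ch with
     | some i => (i : Int)
     | none => 999) = pvRankB ch := by
  fin_cases h <;> rfl

theorem pvRank_agree (c d : Int) : pvRelIdxA c d = pvRankB (pvRel c d) := by
  unfold pvRelIdxA
  exact pvRankIdx_eq _ (pvRel_mem c d)

-- a min-fold never exceeds its start
theorem pvFoldMin_le (f : Int → Int) (l : List Int) :
    ∀ b : Int, l.foldl (fun b d => if f d < b then f d else b) b ≤ b := by
  induction l with
  | nil => intro b; simp
  | cons x t ih =>
    intro b
    simp only [List.foldl_cons]
    have h2 := ih (if f x < b then f x else b)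
    split_ifs at h2 ⊢ <;> omega

theorem pvBestRelFor_le (placed : List Int) (c : Int) : pvBestRelFor placed c ≤ 999 := by
  unfold pvBestRelFor
  exact pvFoldMin_le (pvRelIdxA c) placed 999

-- appending one placed department folds in one min step
theorem pvBestRelFor_append (placed : List Int) (d c : Int) :
    pvBestRelFor (placed ++ [d]) c =
      if pvRelIdxA c d < pvBestRelFor placed c then pvRelIdxA c d else pvBestRelFor placed c := by
  unfold pvBestRelFor
  rw [List.foldl_append]
  simp

-- one table update, pointwise
theorem pvUpd_getD (last : Int) (br : PySem.Dict Int Int) (x y : Int) :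
    (pvUpd last br x).getD y 999 =
      if y = x then
        (if pvRankB (pvRel x last) < br.getD x 999 then pvRankB (pvRel x last)
         else br.getD x 999)
      else br.getD y 999 := by
  unfold pvUpd
  by_cases hr : pvRankB (pvRel x last) < br.getD x 999
  · simp only [hr, if_true]
    rw [PySem.Dict.getD_insert]
  · simp only [hr, if_false]
    split_ifs with hy
    · subst hy; rfl
    · rfl

-- the table update pass, pointwise
theorem pvUpd_fold_getD (u : List Int) (br : PySem.Dict Int Int) (last c : Int)
    (hnd : u.Nodup) :
    (u.foldl (pvUpd last) br).getD c 999 =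
      if c ∈ u then
        (if pvRankB (pvRel c last) < br.getD c 999 then pvRankB (pvRel c last)
         else br.getD c 999)
      else br.getD c 999 := by
  induction u generalizing br with
  | nil => simp
  | cons x t ih =>
    have hx : x ∉ t := (List.nodup_cons.mp hnd).1
    have ht : t.Nodup := (List.nodup_cons.mp hnd).2
    simp only [List.foldl_cons]
    rw [ih _ ht]
    simp only [pvUpd_getD]
    by_cases hcx : c = x
    · subst hcx
      simp [hx]
    · simp [hcx]

-- the 999-initialisation dict
theorem pvInit_getD (u : List Int) (d : PySem.Dict Int Int)
    (h : ∀ c : Int, d.getD c 999 = 999) (c : Int) :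
    (u.foldl (fun d c => d.insert c 999) d).getD c 999 = 999 := by
  induction u generalizing d with
  | nil => exact h c
  | cons x t ih =>
    simp only [List.foldl_cons]
    refine ih _ ?_
    intro y
    rw [PySem.Dict.getD_insert]
    split_ifs with hy
    · rfl
    · exact h y

-- A's candidate step is a lexicographic-max step
theorem pvAStep_eq (tcrs placed : List Int) (bc c : Int) :
    pvAStep tcrs placed (some bc, pvBestRelFor placed bc) c =
      (if pvLexGt3 (-(pvBestRelFor placed c), pvTcr tcrs c, pvSize c)
            (-(pvBestRelFor placed bc), pvTcr tcrs bc, pvSize bc)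
       then (some c, pvBestRelFor placed c) else (some bc, pvBestRelFor placed bc)) := by
  unfold pvAStep pvLexGt3 pvTupGt
  have htri : pvBestRelFor placed c < pvBestRelFor placed bc ∨
      pvBestRelFor placed c = pvBestRelFor placed bc ∨
      pvBestRelFor placed bc < pvBestRelFor placed c := by omega
  rcases htri with h | h | h
  · have h1 : -pvBestRelFor placed c > -pvBestRelFor placed bc := by omega
    simp [h, h1]
  · have h1 : ¬ pvBestRelFor placed c < pvBestRelFor placed bc := by omega
    have h2 : ¬ (-pvBestRelFor placed c > -pvBestRelFor placed bc) := by omega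
    by_cases h3 : pvTcr tcrs c > pvTcr tcrs bc
    · simp [h, h3]
    · by_cases h4 : pvTcr tcrs c = pvTcr tcrs bc
      · by_cases h5 : pvSize c > pvSize bc
        · simp [h, h4, h5]
        · simp [h, h4, h5]
      · simp [h, h3, h4]
  · have h1 : ¬ pvBestRelFor placed c < pvBestRelFor placed bc := by omega
    have h2 : pvBestRelFor placed c ≠ pvBestRelFor placed bc := by omega
    have h3 : ¬ (-pvBestRelFor placed c > -pvBestRelFor placed bc) := by omega
    have h4 : ¬ (-pvBestRelFor placed c = -pvBestRelFor placed bc) := by omega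
    simp [h1, h2, h3, h4]

theorem pvAStep_none (tcrs placed : List Int) (c : Int) :
    pvAStep tcrs placed (none, 999) c = (some c, pvBestRelFor placed c) := by
  unfold pvAStep
  have h := pvBestRelFor_le placed c
  by_cases hb : pvBestRelFor placed c < 999
  · simp [hb]
  · have he : pvBestRelFor placed c = 999 := by omega
    simp [he]

-- A's candidate fold computes the first lexicographic maximum
theorem pvAFold_eq (tcrs placed : List Int) (rest : List Int) (bc : Int) :
    rest.foldl (pvAStep tcrs placed) (some bc, pvBestRelFor placed bc) =
      (some (pvMax3 (fun x => (-(pvBestRelFor placed x), pvTcr tcrs x, pvSize x)) bc rest),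
       pvBestRelFor placed
         (pvMax3 (fun x => (-(pvBestRelFor placed x), pvTcr tcrs x, pvSize x)) bc rest)) := by
  induction rest generalizing bc with
  | nil => simp [pvMax3]
  | cons x t ih =>
    simp only [List.foldl_cons, pvMax3]
    rw [pvAStep_eq]
    by_cases h : pvLexGt3 (-(pvBestRelFor placed x), pvTcr tcrs x, pvSize x)
        (-(pvBestRelFor placed bc), pvTcr tcrs bc, pvSize bc)
    · rw [if_pos h, if_pos h]
      exact ih x
    · rw [if_neg h, if_neg h]
      exact ih bc

theorem pvMax3_mem (key : Int → Int × Int × Int) (b : Int) (rest : List Int) :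
    pvMax3 key b rest ∈ b :: rest := by
  induction rest generalizing b with
  | nil => simp [pvMax3]
  | cons x t ih =>
    simp only [pvMax3]
    by_cases h : pvLexGt3 (key x) (key b)
    · rw [if_pos h]
      rcases List.mem_cons.mp (ih x) with h1 | h1
      · exact List.mem_cons.mpr (Or.inr (List.mem_cons.mpr (Or.inl h1)))
      · exact List.mem_cons.mpr (Or.inr (List.mem_cons.mpr (Or.inr h1)))
    · rw [if_neg h]
      rcases List.mem_cons.mp (ih b) with h1 | h1
      · exact List.mem_cons.mpr (Or.inl h1)
      · exact List.mem_cons.mpr (Or.inr (List.mem_cons.mpr (Or.inr h1)))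

theorem pvMax3_congr (f g : Int → Int × Int × Int) (b : Int) (rest : List Int)
    (h : ∀ c ∈ b :: rest, f c = g c) : pvMax3 f b rest = pvMax3 g b rest := by
  induction rest generalizing b with
  | nil => rfl
  | cons x t ih =>
    simp only [pvMax3]
    have hb : f b = g b := h b (by simp)
    have hx : f x = g x := h x (by simp)
    rw [hb, hx]
    by_cases hc : pvLexGt3 (g x) (g b)
    · rw [if_pos hc]
      refine ih x ?_
      intro c hcm
      rcases List.mem_cons.mp hcm with rfl | hcm
      · exact hx
      · exact h c (by simp [hcm])
    · rw [if_neg hc]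
      refine ih b ?_
      intro c hcm
      rcases List.mem_cons.mp hcm with rfl | hcm
      · exact hb
      · exact h c (by simp [hcm])

theorem pvNodup_removeD (l : List Int) (v : Int) (h : l.Nodup) :
    ((PySem.List.remove? l v).getD l).Nodup := by
  by_cases hv : v ∈ l
  · rw [PySem.List.remove?_eq_some_erase _ _ hv]
    exact h.erase v
  · rw [(PySem.List.remove?_eq_none_iff l v).mpr hv]
    exact h

-- main loop equivalence
theorem pvLoop_eq (tcrs : List Int) (fuel : Nat) :
    ∀ (unplaced placed : List Int) (br : PySem.Dict Int Int) (last : Int),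
      unplaced.Nodup →
      (∀ c ∈ unplaced,
        (if pvRankB (pvRel c last) < br.getD c 999 then pvRankB (pvRel c last)
         else br.getD c 999) = pvBestRelFor placed c) →
      pvALoop tcrs fuel unplaced placed = pvBLoop tcrs fuel br last unplaced placed := by
  induction fuel with
  | zero => intro unplaced placed br last _ _; rfl
  | succ fuel ih =>
    intro unplaced placed br last hnd hinv
    cases unplaced with
    | nil => simp [pvALoop, pvBLoop]
    | cons u0 rest =>
      have hne : (u0 :: rest : List Int) ≠ [] := by simp
      simp only [pvALoop, pvBLoop, if_neg hne]
      have hbr' : ∀ c ∈ (u0 :: rest : List Int),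
          ((u0 :: rest).foldl (pvUpd last) br).getD c 999 = pvBestRelFor placed c := by
        intro c hc
        rw [pvUpd_fold_getD _ _ _ _ hnd, if_pos hc]
        exact hinv c hc
      have hkey : ∀ c ∈ (u0 :: rest : List Int),
          pvKey3 tcrs ((u0 :: rest).foldl (pvUpd last) br) c =
            (-(pvBestRelFor placed c), pvTcr tcrs c, pvSize c) := by
        intro c hc
        unfold pvKey3
        rw [hbr' c hc]
      have hsel : pvMax3 (pvKey3 tcrs ((u0 :: rest).foldl (pvUpd last) br)) u0 rest =
          pvMax3 (fun x => (-(pvBestRelFor placed x), pvTcr tcrs x, pvSize x)) u0 rest :=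
        pvMax3_congr _ _ _ _ hkey
      have hfold : (u0 :: rest).foldl (pvAStep tcrs placed) (none, 999) =
          (some (pvMax3 (fun x => (-(pvBestRelFor placed x), pvTcr tcrs x, pvSize x)) u0 rest),
           pvBestRelFor placed
             (pvMax3 (fun x => (-(pvBestRelFor placed x), pvTcr tcrs x, pvSize x)) u0 rest)) := by
        rw [List.foldl_cons, pvAStep_none, pvAFold_eq]
      rw [hfold, hsel]
      have hmem : pvMax3 (fun x => (-(pvBestRelFor placed x), pvTcr tcrs x, pvSize x)) u0 rest
          ∈ (u0 :: rest : List Int) := pvMax3_mem _ u0 rest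
      have hrm : (PySem.List.remove? (u0 :: rest)
            (pvMax3 (fun x => (-(pvBestRelFor placed x), pvTcr tcrs x, pvSize x)) u0 rest)).getD
            (u0 :: rest) =
          (u0 :: rest).erase
            (pvMax3 (fun x => (-(pvBestRelFor placed x), pvTcr tcrs x, pvSize x)) u0 rest) := by
        rw [PySem.List.remove?_eq_some_erase _ _ hmem]; rfl
      simp only [hrm]
      refine ih _ _ _ _ (hnd.erase _) ?_
      intro c hc
      have hcu : c ∈ (u0 :: rest : List Int) := List.mem_of_mem_erase hc
      rw [pvBestRelFor_append, hbr' c hcu, pvRank_agree]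

-- ===== VERDICT (by name: the statement is the Claim_ definition above) =====
theorem get_placement_order_spec : Claim_equal_get_placement_order := by
  intro tcrs _ _
  unfold Spec_get_placement_order get_placement_order get_placement_order_alt
  cases h : PySem.List.max2? pvDepartments (fun x => pvTcr tcrs x) (fun x => pvSize x) with
  | none => rfl
  | some first =>
    dsimp only
    refine pvLoop_eq tcrs _ _ _ _ _ (pvNodup_removeD _ _ (by decide)) ?_
    intro c hc
    have h999 : (((PySem.List.remove? pvDepartments first).getD pvDepartments).foldl
        (fun d c => d.insert c 999) (PySem.Dict.empty : PySem.Dict Int Int)).getD c 999 = 999 := by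
      refine pvInit_getD _ _ ?_ c
      intro y
      exact PySem.Dict.getD_empty y 999
    rw [h999]
    unfold pvBestRelFor
    simp only [List.foldl_cons, List.foldl_nil]
    rw [pvRank_agree]
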